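-- pv_equiv track=rewrite | github.com/SWeszler/google-kickstart | 2020_D/D2/d2.py | solution_mem
-- ===== SOURCE A (Python) =====
-- def solution_mem(K, notes):
--     dp = {}
--     def findMin(start, i):
--
--         if (start, i) in dp:
--             return dp[start, i]
--
--         if i < 0:
--             return K
--
--         min_val = findMin(start, i - 1)
--
--         down, up = 1, 5
--         if 0 < i < K:
--             if notes[i] > notes[i - 1]:
--                 down = start + 1
--                 up = 5
--             elif notes[i] < notes[i - 1]:
--                 down = 1
--                 up = start
--
--         breaks = 1
--         if down >= up:
--             breaks = 0
--             down, up = 1, 5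
--
--         for c in range(down, up):
--             min_val = min(min_val, findMin(c, i - 1) - breaks)
--
--         dp[start, i] = min_val
--         return min_val
--
--     mn = K
--     for c in range(1, 5):
--         mn = min(mn, findMin(c, K - 1))
--     return mn
-- ===== SOURCE B (Python) =====
-- def solution_mem(K, notes):
--     prev = [K, K, K, K]
--     for i in range(K):
--         cur = []
--         for start in range(1, 5):
--             down, up = 1, 5
--             if i > 0:
--                 if notes[i] > notes[i - 1]:
--                     down, up = start + 1, 5
--                 elif notes[i] < notes[i - 1]:
--                     down, up = 1, start
--             breaks = 1
--             if down >= up: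
--                 breaks, down, up = 0, 1, 5
--             best = prev[start - 1]
--             for c in range(down, up):
--                 best = min(best, prev[c - 1] - breaks)
--             cur.append(best)
--         prev = cur
--     return min([K] + prev)
-- ===== Notes on version B (the rewrite author's own statement) =====
-- stated objective: alternative
-- what changed: Replaces A's top-down memoized recursion (dict-cached findMin over (start,i)) by a bottom-up iterative DP that keeps only the previous layer of four values and folds forward over i; Pre_ excludes inputs where A raises IndexError (K >= 2 with fewer than K notes).
import Mathlib
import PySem

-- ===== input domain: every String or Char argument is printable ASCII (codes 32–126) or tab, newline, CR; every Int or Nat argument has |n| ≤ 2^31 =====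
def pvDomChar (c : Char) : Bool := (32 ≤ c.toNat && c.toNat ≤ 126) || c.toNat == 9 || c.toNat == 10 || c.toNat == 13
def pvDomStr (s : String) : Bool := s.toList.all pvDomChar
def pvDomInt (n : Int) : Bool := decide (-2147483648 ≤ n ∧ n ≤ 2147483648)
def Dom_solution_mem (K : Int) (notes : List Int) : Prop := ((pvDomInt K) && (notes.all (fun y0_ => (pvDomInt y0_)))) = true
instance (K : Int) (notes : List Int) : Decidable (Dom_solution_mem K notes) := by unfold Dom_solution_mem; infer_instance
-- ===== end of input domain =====

-- B replaces A's top-down memoized recursion by a bottom-up iterative DP keeping only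
-- the previous layer of four values (objective: simpler/alternative; return value only).

-- ===== PORT A =====
-- findMin(start, i) ported with fuel = i+1 (fuel 0 ↔ i < 0); the memo dict dp only caches
-- values of this pure recursion, so it is omitted from the port (same values).
def pvFindMin (K : Int) (notes : List Int) : Nat → Int → Int
  | 0, _ => K
  | n + 1, start =>
    let i : Int := (n : Int)
    let mv := pvFindMin K notes n start
    let du : Int × Int :=
      if 0 < i ∧ i < K then
        if PySem.List.pyGetD notes i 0 > PySem.List.pyGetD notes (i - 1) 0 then (start + 1, 5)
        else if PySem.List.pyGetD notes i 0 < PySem.List.pyGetD notes (i - 1) 0 then (1, start)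
        else (1, 5)
      else (1, 5)
    let bdu : Int × Int × Int := if du.1 ≥ du.2 then (0, 1, 5) else (1, du.1, du.2)
    (PySem.List.pyRange bdu.2.1 bdu.2.2 1).foldl
      (fun mv c => min mv (pvFindMin K notes n c - bdu.1)) mv

def solution_mem (K : Int) (notes : List Int) : Int :=
  (PySem.List.pyRange 1 5 1).foldl (fun mn c => min mn (pvFindMin K notes K.toNat c)) K

-- ===== PORT B =====
-- one iteration of B's outer loop: build cur from prev at layer i
def pvStep (notes : List Int) (prev : List Int) (i : Int) : List Int :=
  (PySem.List.pyRange 1 5 1).foldl (fun cur start =>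
    let du : Int × Int :=
      if 0 < i then
        if PySem.List.pyGetD notes i 0 > PySem.List.pyGetD notes (i - 1) 0 then (start + 1, 5)
        else if PySem.List.pyGetD notes i 0 < PySem.List.pyGetD notes (i - 1) 0 then (1, start)
        else (1, 5)
      else (1, 5)
    let bdu : Int × Int × Int := if du.1 ≥ du.2 then (0, 1, 5) else (1, du.1, du.2)
    let best := (PySem.List.pyRange bdu.2.1 bdu.2.2 1).foldl
      (fun best c => min best (PySem.List.pyGetD prev (c - 1) 0 - bdu.1))
      (PySem.List.pyGetD prev (start - 1) 0)
    cur ++ [best]) []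

def solution_mem_alt (K : Int) (notes : List Int) : Int :=
  (PySem.List.min?
    ([K] ++ (PySem.List.pyRange 0 K 1).foldl (pvStep notes) [K, K, K, K]) (fun y => y)).getD 0

-- ===== PRECONDITION & SPEC =====
-- Pre_ excludes exactly the inputs where A raises IndexError: for K ≥ 2 the recursion
-- reads notes[K-1], so notes must have at least K elements.
def Pre_solution_mem (K : Int) (notes : List Int) : Prop := K ≤ 1 ∨ K ≤ (notes.length : Int)
instance (K : Int) (notes : List Int) : Decidable (Pre_solution_mem K notes) := by
  unfold Pre_solution_mem; infer_instance
def pvWitness_solution_mem : Int × List Int := (3, [1, 2, 3])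

def Spec_solution_mem (K : Int) (notes : List Int) (out : Int) : Prop := out = solution_mem_alt K notes
instance (K : Int) (notes : List Int) (out : Int) : Decidable (Spec_solution_mem K notes out) := by unfold Spec_solution_mem; infer_instance

-- ===== CLAIM (what is proved, stated in full; the proofs are below) =====
def Claim_equal_solution_mem : Prop := ∀ (K : Int) (notes : List Int), Dom_solution_mem K notes → Pre_solution_mem K notes → Spec_solution_mem K notes (solution_mem K notes)

-- ===== LEMMAS AND PROOFS =====

-- one step of B applied to A's layer n produces A's layer n+1
set_option maxHeartbeats 4000000 in
lemma pvStep_layer (K : Int) (notes : List Int) (n : Nat) (h : (n : Int) < K) :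
    pvStep notes
      [pvFindMin K notes n 1, pvFindMin K notes n 2, pvFindMin K notes n 3, pvFindMin K notes n 4]
      (n : Int)
    = [pvFindMin K notes (n + 1) 1, pvFindMin K notes (n + 1) 2,
       pvFindMin K notes (n + 1) 3, pvFindMin K notes (n + 1) 4] := by
  have h0 : PySem.List.pyRange 1 5 1 = [1, 2, 3, 4] := by decide
  have h25 : PySem.List.pyRange 2 5 1 = [2, 3, 4] := by decide
  have h35 : PySem.List.pyRange 3 5 1 = [3, 4] := by decide
  have h45 : PySem.List.pyRange 4 5 1 = [4] := by decide
  have h12 : PySem.List.pyRange 1 2 1 = [1] := by decide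
  have h13 : PySem.List.pyRange 1 3 1 = [1, 2] := by decide
  have h14 : PySem.List.pyRange 1 4 1 = [1, 2, 3] := by decide
  have g1 : ∀ x1 x2 x3 x4 : Int, PySem.List.pyGetD [x1, x2, x3, x4] 0 0 = x1 := fun _ _ _ _ => rfl
  have g2 : ∀ x1 x2 x3 x4 : Int, PySem.List.pyGetD [x1, x2, x3, x4] 1 0 = x2 := fun _ _ _ _ => rfl
  have g3 : ∀ x1 x2 x3 x4 : Int, PySem.List.pyGetD [x1, x2, x3, x4] 2 0 = x3 := fun _ _ _ _ => rfl
  have g4 : ∀ x1 x2 x3 x4 : Int, PySem.List.pyGetD [x1, x2, x3, x4] 3 0 = x4 := fun _ _ _ _ => rfl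
  simp only [pvStep, pvFindMin, h0, List.foldl, PySem.List.pyGetD_natCast]
  rcases Nat.eq_zero_or_pos n with hn | hn
  · simp [hn, h0, g1, g2, g3, g4, List.foldl]
  · rcases lt_trichotomy (PySem.List.pyGetD notes ((n : Int) - 1) 0) (notes[n]?.getD 0) with hc | hc | hc
    · simp [hn, h, hc, h0, h25, h35, h45, g1, g2, g3, g4, List.foldl]
    · simp [hn, h, hc, h0, g1, g2, g3, g4, List.foldl]
    · simp [hn, h, hc, lt_asymm hc, h0, h12, h13, h14, g1, g2, g3, g4, List.foldl]

-- the first m iterations of B's fold compute A's layer m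
lemma pvLayers (K : Int) (notes : List Int) :
    ∀ m : Nat, (m : Int) ≤ K →
      (PySem.List.pyRange 0 (m : Int) 1).foldl (pvStep notes) [K, K, K, K]
        = [pvFindMin K notes m 1, pvFindMin K notes m 2, pvFindMin K notes m 3, pvFindMin K notes m 4] := by
  intro m
  induction m with
  | zero =>
    intro _
    rw [show ((0 : Nat) : Int) = 0 by simp, PySem.List.pyRange_one_eq_nil (le_refl 0)]
    rfl
  | succ m ih =>
    intro hm
    have h1 : ((m + 1 : Nat) : Int) = (m : Int) + 1 := by push_cast; ring
    rw [h1, PySem.List.pyRange_one_succ_right (by positivity), List.foldl_append,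
        ih (by omega)]
    simpa using pvStep_layer K notes m (by omega)

-- ===== VERDICT (by name: the statement is the Claim_ definition above) =====
theorem solution_mem_spec : Claim_equal_solution_mem := by
  intro K notes _ _
  unfold Spec_solution_mem solution_mem solution_mem_alt
  have h0 : PySem.List.pyRange 1 5 1 = [1, 2, 3, 4] := by decide
  by_cases hK : 0 < K
  · have hl := pvLayers K notes K.toNat (by omega)
    rw [show ((K.toNat : Nat) : Int) = K by omega] at hl
    rw [hl]
    simp [h0, List.foldl, PySem.List.min?_id_cons]
  · have ht : K.toNat = 0 := by omega
    have hnil : PySem.List.pyRange 0 K 1 = [] := PySem.List.pyRange_one_eq_nil (by omega)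
    rw [hnil, ht]
    simp [PySem.List.min?_id_cons, h0, pvFindMin, List.foldl]
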